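-- pv_equiv track=rewrite | github.com/pauljannis/AADSutility | AADS_detect.py | remadjacent
-- ===== SOURCE A (Python) =====
-- def remadjacent(lst):
--     i = 0
--     while i < len(lst)-1:
--         if lst[i] == (lst[i+1] - 1):
--             del lst[i]
--         else:
--             i += 1
--     return lst
-- ===== SOURCE B (Python) =====
-- def remadjacent(lst):
--     # Single pass: keep each element unless it is one less than its successor.
--     # (A mutates lst in place; B builds a new list -- return value is identical.)
--     return [x for x, y in zip(lst, lst[1:]) if x != y - 1] + lst[-1:]
-- ===== Notes on version B (the rewrite author's own statement) =====
-- stated objective: faster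
-- what changed: Replaced A's while-loop with repeated in-place del (re-scanning from the deletion point) by a single linear pass that filters adjacent pairs of the original list, keeping x unless x == next - 1, plus the last element.
import Mathlib
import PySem

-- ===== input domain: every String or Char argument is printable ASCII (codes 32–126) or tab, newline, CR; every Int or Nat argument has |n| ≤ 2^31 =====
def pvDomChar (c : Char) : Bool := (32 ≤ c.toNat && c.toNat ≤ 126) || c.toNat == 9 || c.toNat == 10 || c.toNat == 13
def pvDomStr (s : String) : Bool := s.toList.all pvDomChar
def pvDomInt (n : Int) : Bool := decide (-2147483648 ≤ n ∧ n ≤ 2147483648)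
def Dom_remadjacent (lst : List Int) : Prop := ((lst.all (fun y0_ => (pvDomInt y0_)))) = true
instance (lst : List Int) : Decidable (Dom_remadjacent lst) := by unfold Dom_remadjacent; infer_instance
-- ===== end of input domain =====

-- B replaces A's quadratic in-place deletion loop by one linear filtering pass over
-- adjacent pairs (A mutates its argument in place; the equivalence is about the return value).

-- ===== PORT A =====
-- while loop with `del lst[i]`; indices i, i+1 are in range when read (i < len-1),
-- so getD is exact here. The loop runs at most len(lst) times (len - i strictly
-- decreases each iteration), so fuel = len(lst) makes the recursion structural.
def remadjacentLoop : Nat → List Int → Nat → List Int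
  | 0, lst, _ => lst
  | fuel+1, lst, i =>
    if i < lst.length - 1 then
      if lst.getD i 0 = lst.getD (i+1) 0 - 1 then
        remadjacentLoop fuel (lst.eraseIdx i) i
      else
        remadjacentLoop fuel lst (i+1)
    else lst

def remadjacent (lst : List Int) : List Int := remadjacentLoop lst.length lst 0

-- ===== PORT B =====
def remadjacent_alt (lst : List Int) : List Int :=
  ((lst.zip (PySem.List.slice lst (some 1) none)).filter
      (fun p => p.1 != p.2 - 1)).map Prod.fst
    ++ PySem.List.slice lst (some (-1)) none

-- ===== PRECONDITION & SPEC =====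
def Spec_remadjacent (lst : List Int) (out : List Int) : Prop := out = remadjacent_alt lst
instance (lst : List Int) (out : List Int) : Decidable (Spec_remadjacent lst out) := by unfold Spec_remadjacent; infer_instance

-- ===== CLAIM (what is proved, stated in full; the proofs are below) =====
def Claim_equal_remadjacent : Prop := ∀ (lst : List Int), Dom_remadjacent lst → Spec_remadjacent lst (remadjacent lst)

-- ===== LEMMAS AND PROOFS =====

-- proof-only recursive characterisation of the result
def pvG : List Int → List Int
  | [] => []
  | [x] => [x]
  | x :: y :: t => if x = y - 1 then pvG (y :: t) else x :: pvG (y :: t)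

theorem pvG_alt (lst : List Int) : remadjacent_alt lst = pvG lst := by
  induction lst with
  | nil => simp [remadjacent_alt, pvG, PySem.List.slice_from_neg_one, PySem.List.slice_from_one]
  | cons x t ih =>
    cases t with
    | nil => simp [remadjacent_alt, pvG, PySem.List.slice_from_neg_one, PySem.List.slice_from_one]
    | cons y s =>
      simp only [remadjacent_alt, PySem.List.slice_from_one, PySem.List.slice_from_neg_one] at ih ⊢
      simp only [List.tail_cons, List.zip_cons_cons, List.filter_cons]
      by_cases h : x = y - 1
      · simp only [pvG, h, bne_self_eq_false, List.length_cons]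
        rw [← ih]
        congr 1
      · simp only [pvG, h, List.length_cons]
        have hb : (x != y - 1) = true := by simp [bne_iff_ne]; exact h
        rw [hb]
        rw [← ih]
        congr 2

theorem pvG_short (l : List Int) (h : l.length ≤ 1) : pvG l = l := by
  match l with
  | [] => rfl
  | [x] => rfl
  | a :: b :: t => simp at h

theorem pvG_cons_eq (y : Int) (t : List Int) : pvG ((y - 1) :: y :: t) = pvG (y :: t) := by
  simp [pvG]

theorem loop_eq (fuel : Nat) (lst : List Int) (i : Nat) (hf : lst.length - i ≤ fuel + 1) :
    remadjacentLoop fuel lst i = lst.take i ++ pvG (lst.drop i) := by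
  induction fuel generalizing lst i with
  | zero =>
    have hlen : (lst.drop i).length ≤ 1 := by simp; omega
    rw [remadjacentLoop, pvG_short _ hlen, List.take_append_drop]
  | succ fuel ih =>
    rw [remadjacentLoop]
    by_cases hlt : i < lst.length - 1
    · rw [if_pos hlt]
      have hi1 : i + 1 < lst.length := by omega
      have hi : i < lst.length := by omega
      have hgi : lst.getD i 0 = lst[i] := List.getD_eq_getElem lst 0 hi
      have hgi1 : lst.getD (i+1) 0 = lst[i+1] := List.getD_eq_getElem lst 0 hi1
      have hdropi : lst.drop i = lst[i] :: lst.drop (i+1) := List.drop_eq_getElem_cons hi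
      have hdropi1 : lst.drop (i+1) = lst[i+1] :: lst.drop (i+2) := List.drop_eq_getElem_cons hi1
      by_cases heq : lst.getD i 0 = lst.getD (i+1) 0 - 1
      · rw [if_pos heq]
        rw [hgi, hgi1] at heq
        have he : lst.eraseIdx i = lst.take i ++ lst.drop (i+1) := List.eraseIdx_eq_take_drop_succ lst i
        have hlen' : (lst.eraseIdx i).length - i ≤ fuel + 1 := by
          rw [List.length_eraseIdx_of_lt hi]; omega
        rw [ih _ _ hlen']
        have htk : (lst.eraseIdx i).take i = lst.take i := by
          rw [he, List.take_append_of_le_length (by simp; omega)]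
          simp [List.take_take]
        have hdr : (lst.eraseIdx i).drop i = lst.drop (i+1) := by
          rw [he, List.drop_append_of_le_length (by simp; omega)]
          simp
        rw [htk, hdr, hdropi, hdropi1, heq, pvG_cons_eq, ← hdropi1]
      · rw [if_neg heq]
        rw [hgi, hgi1] at heq
        have hlen' : lst.length - (i+1) ≤ fuel + 1 := by omega
        rw [ih _ _ hlen']
        have htake : lst.take (i+1) = lst.take i ++ [lst[i]] := by
          rw [List.take_add_one]
          simp [hi]
        have hp : pvG (lst.drop i) = lst[i] :: pvG (lst.drop (i+1)) := by
          rw [hdropi, hdropi1]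
          simp [pvG, heq]
        rw [hp, htake, List.append_assoc, List.singleton_append]
    · rw [if_neg hlt]
      have hlen : (lst.drop i).length ≤ 1 := by simp; omega
      rw [pvG_short _ hlen, List.take_append_drop]

-- ===== VERDICT (by name: the statement is the Claim_ definition above) =====
theorem remadjacent_spec : Claim_equal_remadjacent := by
  intro lst _
  unfold Spec_remadjacent remadjacent
  rw [loop_eq lst.length lst 0 (by omega), pvG_alt]
  simp
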